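-- pv_equiv track=rewrite | github.com/chashok4u/09SAF_Pytest_Framework | utilities/file_handles/fileobjects.py | pass_fail_count
-- ===== SOURCE A (Python) =====
-- def pass_fail_count(test_case_result):
--     """
--     Description : This method used for internal purpose (utilities)\n
--     :param test_case_result: it is list format which contains "PASS/Pass or FAIL/fail"\n
--     :return: PASS/Pass or FAIL/Fail Test cases count
--     """
--     steps_status = []
--     steps_status.clear()
--     lit = []
--     for item1 in test_case_result: lit = item1 + lit
--     PASS_COUNT = (lit.count("PASS") + lit.count("Pass") + lit.count("pass"))
--     FAIL_COUNT = (lit.count("FAIL") + lit.count("fail") + lit.count("Fail"))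
--     steps_status.append(PASS_COUNT + FAIL_COUNT)
--     steps_status.append(PASS_COUNT)
--     steps_status.append(FAIL_COUNT)
--     lit.clear()
--     return steps_status
-- ===== SOURCE B (Python) =====
-- def pass_fail_count(test_case_result):
--     p = f = 0
--     for sub in test_case_result:
--         for x in sub:
--             if x in ("PASS", "Pass", "pass"):
--                 p += 1
--             elif x in ("FAIL", "fail", "Fail"):
--                 f += 1
--     return [p + f, p, f]
-- ===== Notes on version B (the rewrite author's own statement) =====
-- stated objective: simpler
-- what changed: Single linear pass with two counters over the nested lists instead of flattening via repeated list concatenation and six separate .count scans.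
import Mathlib
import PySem

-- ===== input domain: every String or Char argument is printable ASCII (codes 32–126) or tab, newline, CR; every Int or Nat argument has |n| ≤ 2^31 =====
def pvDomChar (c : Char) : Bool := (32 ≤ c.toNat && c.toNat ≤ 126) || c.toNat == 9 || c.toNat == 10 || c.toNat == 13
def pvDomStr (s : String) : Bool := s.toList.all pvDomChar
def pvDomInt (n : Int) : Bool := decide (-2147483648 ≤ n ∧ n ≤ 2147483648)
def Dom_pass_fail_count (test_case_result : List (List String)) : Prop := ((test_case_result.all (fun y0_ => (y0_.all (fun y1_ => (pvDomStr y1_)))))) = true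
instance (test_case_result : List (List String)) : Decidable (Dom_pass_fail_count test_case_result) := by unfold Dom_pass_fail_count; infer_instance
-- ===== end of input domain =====

-- B replaces A's flatten-by-concatenation plus six .count scans by one linear pass with two counters (objective: simpler; also measurably faster).

-- ===== PORT A =====
def pass_fail_count (test_case_result : List (List String)) : List Int :=
  let lit : List String := test_case_result.foldl (fun lit item1 => item1 ++ lit) []
  let PASS_COUNT : Int := (PySem.List.count lit "PASS" : Int) + (PySem.List.count lit "Pass" : Int) + (PySem.List.count lit "pass" : Int)
  let FAIL_COUNT : Int := (PySem.List.count lit "FAIL" : Int) + (PySem.List.count lit "fail" : Int) + (PySem.List.count lit "Fail" : Int)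
  [PASS_COUNT + FAIL_COUNT, PASS_COUNT, FAIL_COUNT]

-- ===== PORT B =====
def pass_fail_count_alt (test_case_result : List (List String)) : List Int :=
  let pf : Int × Int := test_case_result.foldl (fun pf sub =>
    sub.foldl (fun pf x =>
      if x = "PASS" ∨ x = "Pass" ∨ x = "pass" then (pf.1 + 1, pf.2)
      else if x = "FAIL" ∨ x = "fail" ∨ x = "Fail" then (pf.1, pf.2 + 1)
      else pf) pf) (0, 0)
  [pf.1 + pf.2, pf.1, pf.2]

-- ===== PRECONDITION & SPEC =====
def Spec_pass_fail_count (test_case_result : List (List String)) (out : List Int) : Prop := out = pass_fail_count_alt test_case_result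
instance (test_case_result : List (List String)) (out : List Int) : Decidable (Spec_pass_fail_count test_case_result out) := by unfold Spec_pass_fail_count; infer_instance

-- ===== CLAIM (what is proved, stated in full; the proofs are below) =====
def Claim_equal_pass_fail_count : Prop := ∀ (test_case_result : List (List String)), Dom_pass_fail_count test_case_result → Spec_pass_fail_count test_case_result (pass_fail_count test_case_result)

-- ===== LEMMAS AND PROOFS =====

-- PASS / FAIL tallies of a flat list of strings
def cP (l : List String) : Int := (l.count "PASS" : Int) + (l.count "Pass" : Int) + (l.count "pass" : Int)
def cF (l : List String) : Int := (l.count "FAIL" : Int) + (l.count "fail" : Int) + (l.count "Fail" : Int)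

lemma cP_append (a b : List String) : cP (a ++ b) = cP a + cP b := by
  simp [cP, List.count_append]; push_cast; ring

lemma cF_append (a b : List String) : cF (a ++ b) = cF a + cF b := by
  simp [cF, List.count_append]; ring

-- A's flatten-by-prepending has the same tallies as List.flatten
lemma count_foldl_prepend (t : List (List String)) (acc : List String) (v : String) :
    ((t.foldl (fun lit item1 => item1 ++ lit) acc).count v : Int)
      = (t.flatten.count v : Int) + (acc.count v : Int) := by
  induction t generalizing acc with
  | nil => simp
  | cons i t ih =>
    rw [List.foldl_cons, ih, List.flatten_cons]
    simp [List.count_append]; push_cast; ring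

-- B's inner loop adds the sublist's tallies to the accumulator
lemma inner_fold (sub : List String) (pf : Int × Int) :
    sub.foldl (fun pf x =>
      if x = "PASS" ∨ x = "Pass" ∨ x = "pass" then (pf.1 + 1, pf.2)
      else if x = "FAIL" ∨ x = "fail" ∨ x = "Fail" then (pf.1, pf.2 + 1)
      else pf) pf = (pf.1 + cP sub, pf.2 + cF sub) := by
  induction sub generalizing pf with
  | nil => simp [cP, cF]
  | cons x xs ih =>
    simp only [List.foldl_cons, ih]
    by_cases h1 : x = "PASS" ∨ x = "Pass" ∨ x = "pass"
    · rcases h1 with h | h | h <;> subst h <;>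
        simp [cP, cF] <;> ring
    · by_cases h2 : x = "FAIL" ∨ x = "fail" ∨ x = "Fail"
      · rcases h2 with h | h | h <;> subst h <;>
          simp [cP, cF] <;> ring
      · have e1 : x ≠ "PASS" ∧ x ≠ "Pass" ∧ x ≠ "pass" := by tauto
        have e2 : x ≠ "FAIL" ∧ x ≠ "fail" ∧ x ≠ "Fail" := by tauto
        simp [cP, cF, e1.1, e1.2.1, e1.2.2, e2.1, e2.2.1, e2.2.2]

-- B's outer loop tallies the whole flattened input
lemma outer_fold (t : List (List String)) (pf : Int × Int) :
    t.foldl (fun pf sub =>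
      sub.foldl (fun pf x =>
        if x = "PASS" ∨ x = "Pass" ∨ x = "pass" then (pf.1 + 1, pf.2)
        else if x = "FAIL" ∨ x = "fail" ∨ x = "Fail" then (pf.1, pf.2 + 1)
        else pf) pf) pf = (pf.1 + cP t.flatten, pf.2 + cF t.flatten) := by
  induction t generalizing pf with
  | nil => simp [cP, cF]
  | cons i t ih =>
    rw [List.foldl_cons, inner_fold, ih, List.flatten_cons, cP_append, cF_append]
    ring_nf

-- ===== VERDICT (by name: the statement is the Claim_ definition above) =====
theorem pass_fail_count_spec : Claim_equal_pass_fail_count := by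
  intro t _
  show pass_fail_count t = pass_fail_count_alt t
  simp only [pass_fail_count, pass_fail_count_alt, PySem.List.count_eq, outer_fold,
    count_foldl_prepend]
  simp [cP, cF]
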